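-- pv_equiv track=rewrite | github.com/SelzerConst/DeepUrban_ScenarioPreprocessor | src/preprocessor_utils.py | swap_dictionary_nesting
-- ===== SOURCE A (Python) =====
-- def swap_dictionary_nesting(source_data):
--     """
--     Swaps the first and second levels of nesting in a nested dictionary.
--
--     Parameters:
--     - source_data: Dict, the original nested dictionary to be modified.
--
--     Returns:
--     - Dict, a new dictionary with swapped nesting levels.
--     """
--     swapped_data = {}
--
--     # Iterate over all items in the source data
--     for first_key, first_level_data in source_data.items():
--         for second_key, item_data in first_level_data.items():
--             if second_key not in swapped_data:
--                 swapped_data[second_key] = {}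
--             swapped_data[second_key][first_key] = item_data
--
--     return swapped_data
-- ===== SOURCE B (Python) =====
-- def swap_dictionary_nesting(source_data):
--     """Gather all second-level keys first, then build the swapped dict by
--     scanning the first level once per second-level key (reversed nesting)."""
--     second_keys = dict.fromkeys(k for d in source_data.values() for k in d)
--     return {sk: {fk: d[sk] for fk, d in source_data.items() if sk in d}
--             for sk in second_keys}
-- ===== Notes on version B (the rewrite author's own statement) =====
-- stated objective: alternative
-- what changed: A makes one accumulating pass over first-level items building inner dicts incrementally; B first collects the distinct second-level keys (dict.fromkeys) and then, with the loop nesting reversed, rescans the first level once per second-level key with a membership guard.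
import Mathlib
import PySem

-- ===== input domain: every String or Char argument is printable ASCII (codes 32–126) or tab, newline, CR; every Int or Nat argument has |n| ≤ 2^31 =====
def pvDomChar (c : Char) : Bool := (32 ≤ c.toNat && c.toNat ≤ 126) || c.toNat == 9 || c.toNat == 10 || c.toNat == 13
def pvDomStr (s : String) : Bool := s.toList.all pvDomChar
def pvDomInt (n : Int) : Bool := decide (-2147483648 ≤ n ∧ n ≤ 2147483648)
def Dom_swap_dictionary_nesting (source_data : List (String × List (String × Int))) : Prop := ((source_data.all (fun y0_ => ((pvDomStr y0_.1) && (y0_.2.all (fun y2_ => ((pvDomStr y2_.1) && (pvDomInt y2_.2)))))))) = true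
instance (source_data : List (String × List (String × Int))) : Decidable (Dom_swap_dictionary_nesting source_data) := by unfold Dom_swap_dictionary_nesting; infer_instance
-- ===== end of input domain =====

-- B gathers the distinct second-level keys first and then rescans the first level once
-- per second-level key (reversed loop nesting) instead of A's single accumulating pass;
-- objective: alternative decomposition, same results in the same insertion order.

-- ===== PORT A =====
-- literal transliteration of A: outer loop over first-level items, inner loop over the
-- inner dict's items, with the 'if second_key not in swapped_data' guard kept as written.
def swap_dictionary_nesting (source_data : List (String × List (String × Int))) : List (String × List (String × Int)) :=
  let swapped := source_data.foldl (fun sw fp =>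
    fp.2.foldl (fun sw sp =>
      let sw' := if sw.contains sp.1 then sw else sw.insert sp.1 PySem.Dict.empty
      sw'.insert sp.1 ((sw'.getD sp.1 PySem.Dict.empty).insert fp.1 sp.2)) sw)
    (PySem.Dict.empty : PySem.Dict String (PySem.Dict String Int))
  swapped.items.map (fun r => (r.1, r.2.items))

-- ===== PORT B =====
-- transliteration of Source B: dict.fromkeys over all inner keys (= PySem.List.dedup), then
-- for each second key a scan of source_data.items() guarded by membership in the inner dict.
def swap_dictionary_nesting_alt (source_data : List (String × List (String × Int))) : List (String × List (String × Int)) :=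
  let second_keys := PySem.List.dedup (source_data.flatMap (fun p => p.2.map (·.1)))
  second_keys.map (fun sk =>
    (sk, source_data.filterMap (fun p =>
      (p.2.find? (fun q => q.1 == sk)).map (fun q => (p.1, q.2)))))

-- ===== PRECONDITION & SPEC =====
-- Pre_ excludes association lists with duplicate first-level keys or duplicate keys inside
-- an inner list: such lists do not represent any Python dict (A's argument type), so the
-- list-level behaviour there is an artefact of the encoding, not of A.
def Pre_swap_dictionary_nesting (source_data : List (String × List (String × Int))) : Prop :=
  (source_data.map (·.1)).Nodup ∧ ∀ p ∈ source_data, (p.2.map (·.1)).Nodup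
instance (source_data : List (String × List (String × Int))) : Decidable (Pre_swap_dictionary_nesting source_data) := by unfold Pre_swap_dictionary_nesting; infer_instance
def pvWitness_swap_dictionary_nesting : (List (String × List (String × Int))) := [("a", [("x", 1), ("y", 2)]), ("b", [("x", 3)])]

def Spec_swap_dictionary_nesting (source_data : List (String × List (String × Int))) (out : List (String × List (String × Int))) : Prop := out = swap_dictionary_nesting_alt source_data
instance (source_data : List (String × List (String × Int))) (out : List (String × List (String × Int))) : Decidable (Spec_swap_dictionary_nesting source_data out) := by unfold Spec_swap_dictionary_nesting; infer_instance

-- ===== CLAIM (what is proved, stated in full; the proofs are below) =====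
def Claim_equal_swap_dictionary_nesting : Prop := ∀ (source_data : List (String × List (String × Int))), Dom_swap_dictionary_nesting source_data → Pre_swap_dictionary_nesting source_data → Spec_swap_dictionary_nesting source_data (swap_dictionary_nesting source_data)

-- ===== LEMMAS AND PROOFS =====

def pvStep (sw : PySem.Dict String (PySem.Dict String Int)) (t : String × String × Int) : PySem.Dict String (PySem.Dict String Int) :=
  sw.insert t.1 ((sw.getD t.1 PySem.Dict.empty).insert t.2.1 t.2.2)

theorem pvStep_eq (sw : PySem.Dict String (PySem.Dict String Int)) (t : String × String × Int) :
    (let sw' := if sw.contains t.1 then sw else sw.insert t.1 PySem.Dict.empty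
     sw'.insert t.1 ((sw'.getD t.1 PySem.Dict.empty).insert t.2.1 t.2.2)) = pvStep sw t := by
  unfold pvStep
  by_cases h : sw.contains t.1
  · simp [h]
  · simp only [Bool.not_eq_true] at h
    simp [h, PySem.Dict.insert_insert_self, PySem.Dict.getD_insert_self,
      PySem.Dict.getD_of_not_contains (h := h)]

def pvTriples (source_data : List (String × List (String × Int))) : List (String × String × Int) :=
  source_data.flatMap (fun p => p.2.map (fun q => (q.1, p.1, q.2)))

theorem pvA_fold_gen (source_data : List (String × List (String × Int)))
    (init : PySem.Dict String (PySem.Dict String Int)) :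
    source_data.foldl (fun sw fp =>
      fp.2.foldl (fun sw sp =>
        let sw' := if sw.contains sp.1 then sw else sw.insert sp.1 PySem.Dict.empty
        sw'.insert sp.1 ((sw'.getD sp.1 PySem.Dict.empty).insert fp.1 sp.2)) sw)
      init
    = (pvTriples source_data).foldl pvStep init := by
  induction source_data generalizing init with
  | nil => rfl
  | cons fp tl ih =>
    unfold pvTriples
    rw [List.flatMap_cons, List.foldl_append, List.foldl_cons]
    rw [← pvTriples, ← ih]
    congr 1
    have hstep : (fun (sw : PySem.Dict String (PySem.Dict String Int)) (sp : String × Int) =>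
        let sw' := if sw.contains sp.1 then sw else sw.insert sp.1 PySem.Dict.empty
        sw'.insert sp.1 ((sw'.getD sp.1 PySem.Dict.empty).insert fp.1 sp.2))
        = (fun sw sp => pvStep sw (sp.1, fp.1, sp.2)) := by
      funext sw sp; exact pvStep_eq sw (sp.1, fp.1, sp.2)
    rw [hstep, ← List.foldl_map]

theorem pvFold_getD (T : List (String × String × Int)) (d : PySem.Dict String (PySem.Dict String Int)) (sk : String) :
    (T.foldl pvStep d).getD sk PySem.Dict.empty
      = ((T.filter (fun t => t.1 == sk)).map (·.2)).foldl (fun inn q => inn.insert q.1 q.2) (d.getD sk PySem.Dict.empty) := by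
  induction T generalizing d with
  | nil => rfl
  | cons t T ih =>
    rw [List.foldl_cons, ih]
    by_cases h : t.1 = sk
    · subst h
      simp [pvStep, PySem.Dict.getD_insert_self]
    · rw [pvStep, PySem.Dict.getD_insert_of_ne (hne := Ne.symm h)]
      simp [h]

theorem pvFold_keys (T : List (String × String × Int)) :
    (T.foldl pvStep PySem.Dict.empty).keys = PySem.List.dedup (T.map (·.1)) := by
  have := PySem.Dict.keys_foldl_insert_key (l := T) (key := (·.1))
    (f := fun sw t => (sw.getD t.1 PySem.Dict.empty).insert t.2.1 t.2.2)
    (d := (PySem.Dict.empty : PySem.Dict String (PySem.Dict String Int)))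
  simpa [pvStep, PySem.List.dedup_eq_ofList] using this

theorem pvFilter_eq_find (l : List (String × Int)) (sk : String) (h : (l.map (·.1)).Nodup) :
    l.filter (fun q => q.1 == sk) = (l.find? (fun q => q.1 == sk)).toList := by
  induction l with
  | nil => rfl
  | cons a l ih =>
    simp only [List.map_cons, List.nodup_cons] at h
    by_cases ha : a.1 = sk
    · subst ha
      rw [List.filter_cons_of_pos (by simp), List.find?_cons_of_pos (by simp)]
      have : l.filter (fun q => q.1 == a.1) = [] := by
        rw [List.filter_eq_nil_iff]
        intro q hq hqk
        exact h.1 (List.mem_map.mpr ⟨q, hq, by simpa using hqk⟩)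
      simp [this]
    · rw [List.filter_cons_of_neg (by simp [ha]), List.find?_cons_of_neg (by simp [ha])]
      exact ih h.2

theorem pvGroup_eq_filterMap (source_data : List (String × List (String × Int))) (sk : String)
    (hin : ∀ p ∈ source_data, (p.2.map (·.1)).Nodup) :
    ((pvTriples source_data).filter (fun t => t.1 == sk)).map (·.2)
      = source_data.filterMap (fun p => (p.2.find? (fun q => q.1 == sk)).map (fun q => (p.1, q.2))) := by
  induction source_data with
  | nil => rfl
  | cons p tl ih =>
    have hp := hin p (by simp)
    rw [List.filterMap_cons]
    have hhead : ((p.2.map (fun q => (q.1, p.1, q.2))).filter (fun t => t.1 == sk)).map (·.2)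
        = ((p.2.find? (fun q => q.1 == sk)).map (fun q => (p.1, q.2))).toList := by
      rw [List.filter_map, List.map_map]
      have : p.2.filter ((fun t => t.1 == sk) ∘ (fun q => (q.1, p.1, q.2))) = p.2.filter (fun q => q.1 == sk) := rfl
      rw [this, pvFilter_eq_find p.2 sk hp]
      cases p.2.find? (fun q => q.1 == sk) <;> simp
    unfold pvTriples
    rw [List.flatMap_cons, List.filter_append, List.map_append, ← pvTriples, hhead,
      ih (fun q hq => hin q (by simp [hq]))]
    cases (p.2.find? (fun q => q.1 == sk)).map (fun q => (p.1, q.2)) <;> simp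

theorem pvFilterMap_fst_sublist (source_data : List (String × List (String × Int))) (sk : String) :
    ((source_data.filterMap (fun p => (p.2.find? (fun q => q.1 == sk)).map (fun q => (p.1, q.2)))).map (·.1)).Sublist
      (source_data.map (·.1)) := by
  induction source_data with
  | nil => simp
  | cons p tl ih =>
    rw [List.filterMap_cons]
    cases h : (p.2.find? (fun q => q.1 == sk)).map (fun q => (p.1, q.2)) with
    | none => simpa using ih.cons p.1
    | some v =>
      have hv : v.1 = p.1 := by
        cases hf : p.2.find? (fun q => q.1 == sk) <;> rw [hf] at h <;> simp at h
        simp [← h]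
      simpa [hv] using ih.cons₂ p.1

theorem pvEquivMain (src : List (String × List (String × Int)))
    (hfst : (src.map (·.1)).Nodup) (hin : ∀ p ∈ src, (p.2.map (·.1)).Nodup) :
    (src.foldl (fun sw fp =>
        fp.2.foldl (fun sw sp =>
          let sw' := if sw.contains sp.1 then sw else sw.insert sp.1 PySem.Dict.empty
          sw'.insert sp.1 ((sw'.getD sp.1 PySem.Dict.empty).insert fp.1 sp.2)) sw)
        (PySem.Dict.empty : PySem.Dict String (PySem.Dict String Int))).items.map (fun r => (r.1, r.2.items))
    = (PySem.List.dedup (src.flatMap (fun p => p.2.map (·.1)))).map (fun sk =>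
        (sk, src.filterMap (fun p =>
          (p.2.find? (fun q => q.1 == sk)).map (fun q => (p.1, q.2))))) := by
  simp only [pvA_fold_gen]
  have hkeys : ((pvTriples src).foldl pvStep PySem.Dict.empty).keys.Nodup := by
    have : (pvTriples src).foldl pvStep PySem.Dict.empty
        = (pvTriples src).foldl (fun sw t => sw.insert t.1 ((sw.getD t.1 PySem.Dict.empty).insert t.2.1 t.2.2)) PySem.Dict.empty := rfl
    rw [this]
    exact PySem.Dict.nodup_keys_foldl_insert_key _ _ _ _ PySem.Dict.nodup_keys_empty
  rw [PySem.Dict.items_eq_map_keys _ hkeys PySem.Dict.empty, pvFold_keys, List.map_map]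
  have hS : (pvTriples src).map (·.1) = src.flatMap (fun p => p.2.map (·.1)) := by
    simp [pvTriples, List.map_flatMap, List.map_map]; rfl
  rw [hS]
  apply List.map_congr_left
  intro sk _
  simp only [Function.comp]
  congr 1
  rw [pvFold_getD, PySem.Dict.getD_empty]
  have hgrp := pvGroup_eq_filterMap src sk hin
  rw [hgrp]
  set l := src.filterMap (fun p => (p.2.find? (fun q => q.1 == sk)).map (fun q => (p.1, q.2))) with hl
  have hnod : (l.map (·.1)).Nodup := (pvFilterMap_fst_sublist src sk).nodup hfst
  have := PySem.Dict.items_foldl_insert_fresh (l := l) (k := (·.1)) (v := (·.2))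
    (d := (PySem.Dict.empty : PySem.Dict String Int)) (by simp) hnod
  simpa using this

-- ===== VERDICT (by name: the statement is the Claim_ definition above) =====
theorem swap_dictionary_nesting_spec : Claim_equal_swap_dictionary_nesting := by
  intro src _ hpre
  unfold Spec_swap_dictionary_nesting swap_dictionary_nesting swap_dictionary_nesting_alt
  exact pvEquivMain src hpre.1 hpre.2
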